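-- pv_equiv track=rewrite | github.com/jfgoodall/advent-of-code | 2025/py/day01.py | part1
-- ===== SOURCE A (Python) =====
-- def part1(turns):
--     zeros = 0
--     pos = 50
--     for dir, count in turns:
--         if dir == 'L':
--             count = -count
--         pos += count
--         if pos % 100 == 0:
--             zeros += 1
--     return zeros
-- ===== SOURCE B (Python) =====
-- def part1(turns):
--     # Divide and conquer: a segment is summarized by (total signed delta mod 100,
--     # histogram over residues 0..99 of its nonempty prefix-sum residues).
--     # Merging shifts the right histogram by the left total; the answer is the
--     # count of prefixes whose residue is 50, since positions are 50 + prefix.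
--     def solve(seg):
--         if len(seg) <= 1:
--             hist = [0] * 100
--             if not seg:
--                 return 0, hist
--             d, c = seg[0]
--             delta = (-c if d == 'L' else c) % 100
--             hist[delta] = 1
--             return delta, hist
--         mid = len(seg) // 2
--         tl, hl = solve(seg[:mid])
--         tr, hr = solve(seg[mid:])
--         hist = [hl[r] + hr[(r - tl) % 100] for r in range(100)]
--         return (tl + tr) % 100, hist
--     return solve(turns)[1][50]
-- ===== Notes on version B (the rewrite author's own statement) =====
-- stated objective: alternative
-- what changed: Replaces A's single fused running-position scan with a divide-and-conquer: each half-list is summarized as (total delta mod 100, histogram of prefix-sum residues mod 100), halves are merged by shifting the right histogram by the left total, and the answer is read off as the histogram entry at residue 50.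
import Mathlib
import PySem

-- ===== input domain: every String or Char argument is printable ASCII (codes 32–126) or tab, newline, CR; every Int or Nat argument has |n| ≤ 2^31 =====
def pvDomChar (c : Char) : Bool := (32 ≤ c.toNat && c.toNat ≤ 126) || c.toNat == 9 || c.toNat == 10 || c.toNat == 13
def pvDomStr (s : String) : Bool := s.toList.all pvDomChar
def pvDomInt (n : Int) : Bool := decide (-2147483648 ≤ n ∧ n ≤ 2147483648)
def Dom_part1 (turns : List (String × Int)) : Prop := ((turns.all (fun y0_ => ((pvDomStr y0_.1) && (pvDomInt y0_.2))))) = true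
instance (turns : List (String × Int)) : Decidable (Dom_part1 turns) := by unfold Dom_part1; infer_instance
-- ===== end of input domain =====

-- B (alternative): replaces A's fused running-position scan by a divide-and-conquer that
-- summarizes each half as (total delta mod 100, histogram of prefix-sum residues) and merges
-- by shifting the right histogram; the answer is the histogram entry at residue 50.


-- ===== PORT A =====
-- literal transliteration of A: one fold carrying (zeros, pos)
def pvStepA (st : Int × Int) (dc : String × Int) : Int × Int :=
  let count := if dc.1 == "L" then -dc.2 else dc.2
  let pos := st.2 + count
  let zeros := if PySem.Int.mod pos 100 == 0 then st.1 + 1 else st.1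
  (zeros, pos)

def part1 (turns : List (String × Int)) : Int :=
  (turns.foldl pvStepA (0, 50)).1

-- ===== PORT B =====
-- transliteration of Source B's solve: (total mod 100, residue histogram of nonempty prefixes)
def pvSolve (seg : List (String × Int)) : Int × List Int :=
  if _h : seg.length ≤ 1 then
    match seg with
    | [] => (0, List.replicate 100 0)
    | dc :: _ =>
      let delta := PySem.Int.mod (if dc.1 == "L" then -dc.2 else dc.2) 100
      (delta, (List.replicate 100 (0 : Int)).set delta.toNat 1)
  else
    let mid := seg.length / 2
    let l := pvSolve (seg.take mid)
    let r := pvSolve (seg.drop mid)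
    (PySem.Int.mod (l.1 + r.1) 100,
     (List.range 100).map (fun i =>
       l.2.getD i 0 + r.2.getD (PySem.Int.mod ((i : Int) - l.1) 100).toNat 0))
termination_by seg.length
decreasing_by
  · simp; omega
  · simp; omega

def part1_alt (turns : List (String × Int)) : Int :=
  (pvSolve turns).2.getD 50 0

-- ===== PRECONDITION & SPEC =====
def Spec_part1 (turns : List (String × Int)) (out : Int) : Prop := out = part1_alt turns
instance (turns : List (String × Int)) (out : Int) : Decidable (Spec_part1 turns out) := by unfold Spec_part1; infer_instance

-- ===== CLAIM (what is proved, stated in full; the proofs are below) =====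
def Claim_equal_part1 : Prop := ∀ (turns : List (String × Int)), Dom_part1 turns → Spec_part1 turns (part1 turns)

-- ===== LEMMAS AND PROOFS =====

def pvTot (seg : List (String × Int)) : Int :=
  (seg.map (fun dc => if dc.1 == "L" then -dc.2 else dc.2)).sum

lemma pvGetD_map_range (f : Nat → Int) (k : Nat) (hk : k < 100) :
    (((List.range 100).map f).getD k 0) = f k := by
  simp [List.getD, hk]

lemma pvGetD_set (j k : Nat) (hj : j < 100) (hk : k < 100) :
    (((List.replicate 100 (0 : Int)).set j 1).getD k 0) = if k = j then 1 else 0 := by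
  by_cases h : k = j
  · simp [List.getD, h, hj]
  · simp only [List.getD, List.getElem?_eq_getElem (by simpa [hj] using hk : k < ((List.replicate 100 (0:Int)).set j 1).length), Option.getD_some]
    rw [List.getElem_set_ne (by omega)]
    rw [List.getElem_replicate]
    simp [h]

lemma pvMod_emod (a : Int) : PySem.Int.mod a 100 = a % 100 :=
  PySem.Int.mod_eq_emod_of_pos (by norm_num)

lemma pvModLt (a : Int) : (PySem.Int.mod a 100).toNat < 100 := by
  rw [pvMod_emod]; omega

lemma pvTot_append (l r : List (String × Int)) : pvTot (l ++ r) = pvTot l + pvTot r := by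
  simp [pvTot]

lemma pvSolve_spec (seg : List (String × Int)) :
    (pvSolve seg).1 = PySem.Int.mod (pvTot seg) 100 ∧
    (pvSolve seg).2.length = 100 ∧
    ∀ z p : Int, seg.foldl pvStepA (z, p) =
      (z + (pvSolve seg).2.getD (PySem.Int.mod (-p) 100).toNat 0, p + pvTot seg) := by
  induction seg using pvSolve.induct with
  | case1 =>
    rw [pvSolve]
    refine ⟨by simp [pvTot], by simp, ?_⟩
    intro z p
    have hz : ∀ k : Nat, (List.replicate 100 (0:Int)).getD k 0 = 0 := by
      intro k
      simp only [List.getD, List.getElem?_replicate]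
      split <;> rfl
    refine Prod.ext ?_ (by simp [pvTot])
    norm_num [hz]
  | case2 dc tail h =>
    have ht : tail = [] := by
      cases tail with
      | nil => rfl
      | cons a t => simp at h
    subst ht
    rw [pvSolve]
    simp only [List.length_cons, List.length_nil, Nat.reduceAdd, dif_pos (by norm_num : (1:Nat) ≤ 1)]
    refine ⟨by simp [pvTot], by simp, ?_⟩
    intro z p
    simp only [List.foldl_cons, List.foldl_nil, pvStepA, pvTot, List.map_cons, List.map_nil,
      List.sum_cons, List.sum_nil]
    rw [pvGetD_set _ _ (pvModLt _) (pvModLt _)]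
    simp only [beq_iff_eq, pvMod_emod]
    split_ifs with h1 h2 <;> simp_all <;> omega
  | case3 seg h mid iht ihd =>
    obtain ⟨l1, l2, lf⟩ := iht
    obtain ⟨r1, r2, rf⟩ := ihd
    rw [show mid = seg.length / 2 from rfl] at l1 l2 lf r1 r2 rf
    have hsplit : List.take (seg.length/2) seg ++ List.drop (seg.length/2) seg = seg :=
      List.take_append_drop _ _
    have hTot : pvTot seg
        = pvTot (List.take (seg.length/2) seg) + pvTot (List.drop (seg.length/2) seg) := by
      rw [← pvTot_append, hsplit]
    rw [pvSolve]
    simp only [dif_neg h]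
    refine ⟨?_, by simp, ?_⟩
    · rw [l1, r1, hTot]
      simp only [pvMod_emod]
      omega
    · intro z p
      conv_lhs => rw [← hsplit]
      rw [List.foldl_append, lf z p, rf]
      rw [pvGetD_map_range _ _ (pvModLt _)]
      rw [hTot]
      refine Prod.ext ?_ (by ring)
      simp only []
      rw [Int.toNat_of_nonneg (by rw [pvMod_emod]; omega : (0:Int) ≤ PySem.Int.mod (-p) 100)]
      rw [l1]
      have e1 : PySem.Int.mod (-(p + pvTot (List.take (seg.length / 2) seg))) 100
          = PySem.Int.mod (PySem.Int.mod (-p) 100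
              - PySem.Int.mod (pvTot (List.take (seg.length / 2) seg)) 100) 100 := by
        simp only [pvMod_emod]; omega
      rw [← e1, add_assoc]

-- ===== VERDICT =====
theorem part1_spec : Claim_equal_part1 := by
  intro turns _
  unfold Spec_part1 part1 part1_alt
  obtain ⟨_, _, h⟩ := pvSolve_spec turns
  rw [h 0 50]
  simp [List.getD]
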